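-- pv_equiv track=rewrite | github.com/pypi-data/pypi-mirror-404 | packages/alloy-config-generator/alloy_config_generator-0.1.1.tar.gz/alloy_config_generator-0.1.1/alloy_config_generator/cli.py | compute_required_signals
-- ===== SOURCE A (Python) =====
-- def compute_required_signals(scrapes):
--     """Determine which signal types are required by the selected scrapes."""
--     required = set()
--     for scrape in scrapes:
--         scrape_type = scrape.get("type")
--         if scrape_type in {"logs", "logs-journal", "logs-k8s"}:
--             required.add("loki")
--         if scrape_type in {"metrics", "metrics-k8s", "metrics-k8s-pods"}:
--             required.add("prometheus")
--     return required
-- ===== SOURCE B (Python) =====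
-- LOG_TYPES = frozenset({"logs", "logs-journal", "logs-k8s"})
-- METRIC_TYPES = frozenset({"metrics", "metrics-k8s", "metrics-k8s-pods"})
--
--
-- def _signals_for(scrape_type):
--     """Signal backends required by one scrape type."""
--     if scrape_type in LOG_TYPES:
--         return {"loki"}
--     if scrape_type in METRIC_TYPES:
--         return {"prometheus"}
--     return set()
--
--
-- def compute_required_signals(scrapes):
--     """Determine which signal types are required by the selected scrapes."""
--     n = len(scrapes)
--     if n == 0:
--         return set()
--     if n == 1:
--         return _signals_for(scrapes[0].get("type"))
--     mid = n // 2
--     return compute_required_signals(scrapes[:mid]) | compute_required_signals(scrapes[mid:])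
-- ===== Notes on version B (the rewrite author's own statement) =====
-- stated objective: alternative
-- what changed: Replaced A's single accumulating loop with per-element if-add branching by a divide-and-conquer recursion: a scrape list is split in half, each half solved recursively, and the two signal sets merged with set union, with a base-case helper mapping one scrape type to its singleton signal set.
import Mathlib
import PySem

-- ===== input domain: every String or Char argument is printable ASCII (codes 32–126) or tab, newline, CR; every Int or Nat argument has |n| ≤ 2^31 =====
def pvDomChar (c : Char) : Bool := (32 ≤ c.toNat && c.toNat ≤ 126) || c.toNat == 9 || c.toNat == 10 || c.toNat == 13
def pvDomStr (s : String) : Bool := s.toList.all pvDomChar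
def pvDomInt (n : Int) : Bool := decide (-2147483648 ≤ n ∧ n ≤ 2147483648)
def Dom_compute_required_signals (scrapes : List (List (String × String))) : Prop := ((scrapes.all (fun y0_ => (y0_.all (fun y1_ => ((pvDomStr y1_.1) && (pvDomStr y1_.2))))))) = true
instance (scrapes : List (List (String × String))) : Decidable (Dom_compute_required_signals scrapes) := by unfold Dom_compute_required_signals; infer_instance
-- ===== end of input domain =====

-- B replaces A's accumulating loop with if-add branches by a divide-and-conquer
-- recursion (split in half, recurse, set union) over a per-scrape-type helper
-- (objective: alternative). Return value is a Python set: both ports realise it as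
-- its PySem.Set element list.

-- ===== PORT A =====
-- 'scrape_type in {…}' where scrape_type may be None (missing key): None is in neither set.
def pvOptIn (x : Option String) (s : List String) : Bool :=
  match x with
  | some t => s.contains t
  | none => false

def compute_required_signals (scrapes : List (List (String × String))) : List String :=
  scrapes.foldl (fun required scrape =>
    let scrape_type := PySem.Dict.get? (PySem.Dict.mk scrape) "type"
    let required :=
      if pvOptIn scrape_type ["logs", "logs-journal", "logs-k8s"] then
        PySem.Set.add required "loki"
      else required
    if pvOptIn scrape_type ["metrics", "metrics-k8s", "metrics-k8s-pods"] then
      PySem.Set.add required "prometheus"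
    else required) PySem.Set.empty

-- ===== PORT B =====
-- _signals_for: 'scrape_type in LOG_TYPES' with scrape_type possibly None (missing key).
def pvSignalsFor (scrape_type : Option String) : List String :=
  if pvOptIn scrape_type ["logs", "logs-journal", "logs-k8s"] then ["loki"]
  else if pvOptIn scrape_type ["metrics", "metrics-k8s", "metrics-k8s-pods"] then ["prometheus"]
  else PySem.Set.empty

-- scrapes[:mid] / scrapes[mid:] with mid = n // 2, 0 ≤ mid ≤ n: exactly take/drop
-- (PySem.List.slice_to_natCast / slice_from_natCast); n // 2 on n ≥ 0 is Nat division.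
def compute_required_signals_alt (scrapes : List (List (String × String))) : List String :=
  match scrapes with
  | [] => PySem.Set.empty
  | [s] => pvSignalsFor (PySem.Dict.get? (PySem.Dict.mk s) "type")
  | x :: y :: rest =>
      let mid := (x :: y :: rest).length / 2
      PySem.Set.union (compute_required_signals_alt ((x :: y :: rest).take mid))
                      (compute_required_signals_alt ((x :: y :: rest).drop mid))
  termination_by scrapes.length
  decreasing_by
  · simp [List.length_take]; omega
  · simp [List.length_drop]; omega

-- ===== PRECONDITION & SPEC =====
def Spec_compute_required_signals (scrapes : List (List (String × String))) (out : List String) : Prop := out = compute_required_signals_alt scrapes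
instance (scrapes : List (List (String × String))) (out : List String) : Decidable (Spec_compute_required_signals scrapes out) := by unfold Spec_compute_required_signals; infer_instance

-- ===== CLAIM (what is proved, stated in full; the proofs are below) =====
def Claim_equal_compute_required_signals : Prop := ∀ (scrapes : List (List (String × String))), Dom_compute_required_signals scrapes → Spec_compute_required_signals scrapes (compute_required_signals scrapes)

-- ===== LEMMAS AND PROOFS =====

-- One scrape's signals, shared characterisation of both ports' per-scrape behaviour.
def pvSig (s : List (String × String)) : List String :=
  pvSignalsFor (PySem.Dict.get? (PySem.Dict.mk s) "type")

-- A's two-branch step equals folding Set.add over that scrape's signal list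
-- (at most one branch fires: the two literal type sets are disjoint).
lemma pv_step_eq (acc : List String) (scrape : List (String × String)) :
    (let scrape_type := PySem.Dict.get? (PySem.Dict.mk scrape) "type"
     let required :=
       if pvOptIn scrape_type ["logs", "logs-journal", "logs-k8s"] then
         PySem.Set.add acc "loki"
       else acc
     if pvOptIn scrape_type ["metrics", "metrics-k8s", "metrics-k8s-pods"] then
       PySem.Set.add required "prometheus"
     else required)
    = (pvSig scrape).foldl PySem.Set.add acc := by
  unfold pvSig pvSignalsFor
  cases h : PySem.Dict.get? (PySem.Dict.mk scrape) "type" with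
  | none => simp [pvOptIn]
  | some t =>
      simp only [pvOptIn]
      by_cases hl : t = "logs" ∨ t = "logs-journal" ∨ t = "logs-k8s"
      · rcases hl with rfl | rfl | rfl <;> simp
      · by_cases hm : t = "metrics" ∨ t = "metrics-k8s" ∨ t = "metrics-k8s-pods"
        · rcases hm with rfl | rfl | rfl <;> simp
        · push Not at hl hm
          obtain ⟨a1, a2, a3⟩ := hl; obtain ⟨b1, b2, b3⟩ := hm
          simp [a1, a2, a3, b1, b2, b3, PySem.Set.empty]

-- A's fold over the scrapes is the Set.add-fold over the concatenated signal lists.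
lemma pv_foldlA_eq (scrapes : List (List (String × String))) (acc : List String) :
    scrapes.foldl (fun required scrape =>
      let scrape_type := PySem.Dict.get? (PySem.Dict.mk scrape) "type"
      let required :=
        if pvOptIn scrape_type ["logs", "logs-journal", "logs-k8s"] then
          PySem.Set.add required "loki"
        else required
      if pvOptIn scrape_type ["metrics", "metrics-k8s", "metrics-k8s-pods"] then
        PySem.Set.add required "prometheus"
      else required) acc
    = (scrapes.flatMap pvSig).foldl PySem.Set.add acc := by
  induction scrapes generalizing acc with
  | nil => rfl
  | cons s rest ih =>
      simp only [List.foldl_cons, List.flatMap_cons, List.foldl_append]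
      rw [show _ = _ from pv_step_eq acc s]
      exact ih _

-- hence A = set(flatMap pvSig scrapes)
lemma pv_A_char (scrapes : List (List (String × String))) :
    compute_required_signals scrapes = PySem.Set.ofList (scrapes.flatMap pvSig) := by
  rw [PySem.Set.ofList_eq_foldl]
  exact pv_foldlA_eq scrapes PySem.Set.empty

lemma pv_union_ofList (a b : List String) :
    PySem.Set.union (PySem.Set.ofList a) (PySem.Set.ofList b)
      = PySem.Set.ofList (a ++ b) := by
  rw [PySem.Set.ofList_append, PySem.Set.union, PySem.Set.update_eq_append_filter,
    PySem.Set.update_eq_append_filter, PySem.Set.ofList_ofList]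

lemma pv_sig_nodup (s : List (String × String)) : (pvSig s).Nodup := by
  unfold pvSig pvSignalsFor
  split_ifs <;> simp [PySem.Set.empty]

-- B = set(flatMap pvSig scrapes) as well
lemma pv_B_char (scrapes : List (List (String × String))) :
    compute_required_signals_alt scrapes = PySem.Set.ofList (scrapes.flatMap pvSig) := by
  fun_induction compute_required_signals_alt scrapes with
  | case1 => rfl
  | case2 s =>
      simp only [List.flatMap_cons, List.flatMap_nil, List.append_nil]
      rw [PySem.Set.ofList_eq_self_of_nodup _ (pv_sig_nodup s)]
      rfl
  | case3 x y rest mid ih1 ih2 =>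
      show PySem.Set.union (compute_required_signals_alt ((x :: y :: rest).take mid))
            (compute_required_signals_alt ((x :: y :: rest).drop mid))
          = _
      rw [ih1, ih2, pv_union_ofList, ← List.flatMap_append, List.take_append_drop]

-- ===== VERDICT (by name: the statement is the Claim_ definition above) =====
theorem compute_required_signals_spec : Claim_equal_compute_required_signals := by
  intro scrapes _
  unfold Spec_compute_required_signals
  rw [pv_A_char, pv_B_char]
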